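-- pv_equiv track=rewrite | github.com/mprestonsparks/IndexAgent | indexagent/agents/evolution/cellular_automata_backup.py | _build_rule_table
-- ===== SOURCE A (Python) =====
-- from typing import List, Dict, Any, Tuple, Optional, Set
--
-- def _build_rule_table(rule_number: int) -> Dict[Tuple[int, int, int], int]:
--     """Build lookup table for specific Wolfram rule."""
--     binary = format(rule_number, '08b')
--     neighborhoods = [
--         (1, 1, 1), (1, 1, 0), (1, 0, 1), (1, 0, 0),
--         (0, 1, 1), (0, 1, 0), (0, 0, 1), (0, 0, 0)
--     ]
--
--     table = {}
--     for i, neighborhood in enumerate(neighborhoods):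
--         table[neighborhood] = int(binary[i])
--
--     return table
-- ===== SOURCE B (Python) =====
-- def _build_rule_table(rule_number):
--     """Build lookup table for specific Wolfram rule.
--
--     Peels the rule's bits off least-significant first with divmod, pairing
--     bit v with the neighborhood (a, b, c) whose binary value is v, then
--     builds the dict from the highest neighborhood down.
--     """
--     bits = rule_number
--     entries = []
--     for a in (0, 1):
--         for b in (0, 1):
--             for c in (0, 1):
--                 bits, bit = divmod(bits, 2)
--                 entries.append(((a, b, c), bit))
--     return dict(reversed(entries))
-- ===== Notes on version B (the rewrite author's own statement) =====
-- stated objective: alternative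
-- what changed: Replaces format-to-binary-string plus a hardcoded neighborhood list indexed by enumerate with LSB-first bit peeling: divmod strips one bit per neighborhood generated in ascending binary order, and the dict is built from the collected entries in reverse; Pre_ restricts to the byte-sized Wolfram rule codes, excluding negatives (A raises ValueError on the sign digit) and rule numbers above the largest code, where no table is specified and A (first eight characters of a wider binary string) and B (the low eight bits) make different, equally defensible extrapolations.
import Mathlib
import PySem

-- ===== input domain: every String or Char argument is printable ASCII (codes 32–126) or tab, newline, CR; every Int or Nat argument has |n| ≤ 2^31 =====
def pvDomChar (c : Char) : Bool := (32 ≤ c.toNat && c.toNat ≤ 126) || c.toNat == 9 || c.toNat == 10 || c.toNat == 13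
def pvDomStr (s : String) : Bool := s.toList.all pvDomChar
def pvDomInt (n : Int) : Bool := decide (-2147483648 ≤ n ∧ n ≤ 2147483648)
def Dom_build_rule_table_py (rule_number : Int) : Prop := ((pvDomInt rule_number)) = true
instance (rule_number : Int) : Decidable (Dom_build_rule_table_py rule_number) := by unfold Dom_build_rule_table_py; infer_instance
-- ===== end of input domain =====

-- B builds the table by peeling bits LSB-first with divmod over neighborhoods in
-- ascending binary order and reversing, instead of A's binary-string formatting
-- indexed against a hardcoded neighborhood list; objective: alternative.

-- ===== PORT A =====
-- MSB-first binary digits of n, as format(n, 'b') prints them (fuel = n makes the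
-- repeated halving structural; fuel n always suffices since n halves each step).
def pvBinDigitsAux : Nat → Nat → List Int
  | 0, n => [(n : Int)]
  | fuel + 1, n => if n < 2 then [(n : Int)] else pvBinDigitsAux fuel (n / 2) ++ [((n % 2 : Nat) : Int)]

def pvBinDigits (n : Nat) : List Int := pvBinDigitsAux n n

def build_rule_table_py (rule_number : Int) : List (Int × Int × Int × Int) :=
  -- binary = format(rule_number, '08b'): the digit characters int(binary[i]) reads, kept
  -- as ints.  For rule_number < 0 Python raises ValueError at int('-'); Pre_ excludes that
  -- region, here we use |rule_number|'s digits (unclaimed).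
  let digs := pvBinDigits rule_number.natAbs
  let binary : List Int := List.replicate (8 - digs.length) 0 ++ digs
  let neighborhoods : List (Int × Int × Int) :=
    [(1,1,1), (1,1,0), (1,0,1), (1,0,0), (0,1,1), (0,1,0), (0,0,1), (0,0,0)]
  -- for i, neighborhood in enumerate(neighborhoods): table[neighborhood] = int(binary[i]);
  -- the eight keys are pairwise distinct, so the insertion-order dict is this append fold;
  -- binary[i] is in range (len ≥ 8 > i), so pyGetD is exact.
  (PySem.List.enumerate neighborhoods).foldl
    (fun table p => table ++ [(p.2.1, p.2.2.1, p.2.2.2, PySem.List.pyGetD binary p.1 0)]) []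

-- ===== PORT B =====
def build_rule_table_py_alt (rule_number : Int) : List (Int × Int × Int × Int) :=
  -- bits = rule_number; entries = []; the three nested 'for _ in (0, 1)' loops, each a
  -- fold over [0, 1] carrying (bits, entries); 'bits, bit = divmod(bits, 2)' is
  -- Python floor division / floor modulus (divisor 2 > 0).
  let st :=
    ([(0 : Int), 1]).foldl (fun st a =>
      ([(0 : Int), 1]).foldl (fun st b =>
        ([(0 : Int), 1]).foldl (fun st c =>
          (PySem.Int.floordiv st.1 2,
           st.2 ++ [(a, b, c, PySem.Int.mod st.1 2)])) st) st)
      ((rule_number, []) : Int × List (Int × Int × Int × Int))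
  -- dict(reversed(entries)): the eight keys are pairwise distinct, so the dict in
  -- insertion order is exactly the reversed entry list.
  st.2.reverse

-- ===== PRECONDITION & SPEC =====
-- Pre_ restricts to the byte-sized Wolfram rule codes: a negative rule_number makes A
-- raise ValueError (int('-') on the sign character), and above the largest code no
-- table is specified — there A reads the first eight characters of a now-wider binary
-- string while B reads the low eight bits, two equally defensible extrapolations.
def Pre_build_rule_table_py (rule_number : Int) : Prop :=
  0 ≤ rule_number ∧ rule_number ≤ 255
instance (rule_number : Int) : Decidable (Pre_build_rule_table_py rule_number) := by
  unfold Pre_build_rule_table_py; infer_instance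

def pvWitness_build_rule_table_py : Int := 110

def Spec_build_rule_table_py (rule_number : Int) (out : List (Int × Int × Int × Int)) : Prop :=
  out = build_rule_table_py_alt rule_number
instance (rule_number : Int) (out : List (Int × Int × Int × Int)) : Decidable (Spec_build_rule_table_py rule_number out) := by
  unfold Spec_build_rule_table_py; infer_instance

-- ===== CLAIM (what is proved, stated in full; the proofs are below) =====
def Claim_equal_build_rule_table_py : Prop := ∀ (rule_number : Int), Dom_build_rule_table_py rule_number → Pre_build_rule_table_py rule_number → Spec_build_rule_table_py rule_number (build_rule_table_py rule_number)

-- ===== LEMMAS AND PROOFS =====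

-- Both ports evaluate to literal lists on each of the 256 rule codes; one kernel check.
set_option maxRecDepth 4000 in
theorem pvAllCodes : ∀ m : Fin 256,
    build_rule_table_py ((m : Nat) : Int) = build_rule_table_py_alt ((m : Nat) : Int) := by
  decide

-- ===== VERDICT (by name: the statement is the Claim_ definition above) =====
theorem build_rule_table_py_spec : Claim_equal_build_rule_table_py := by
  intro r _hdom hpre
  unfold Spec_build_rule_table_py
  obtain ⟨h0, h255⟩ := hpre
  obtain ⟨n, rfl⟩ := Int.eq_ofNat_of_zero_le h0
  have hn : n < 256 := by exact_mod_cast (by omega : (n : Int) < 256)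
  exact pvAllCodes ⟨n, hn⟩
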